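-- pv_equiv track=rewrite | github.com/ahmed-elbehairy7/old_whatbot | vip.py | more_than_five
-- ===== SOURCE A (Python) =====
-- def more_than_five(phone):
--     for i in range(10):
--         count = 0
--         for j in range(8):
--             if phone[j] == str(i):
--                 count += 1
--         if count >= 5:
--             return True
--     return False
-- ===== SOURCE B (Python) =====
-- def more_than_five(phone):
--     counts = {}
--     for j in range(8):
--         c = phone[j]
--         counts[c] = counts.get(c, 0) + 1
--     return any(counts.get(d, 0) >= 5 for d in "0123456789")
-- ===== Notes on version B (the rewrite author's own statement) =====
-- stated objective: idiomatic
-- what changed: Replaced A's ten separate per-digit scans of the first 8 characters by a single pass that builds a character-frequency dictionary, followed by ten constant-time lookups.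
import Mathlib
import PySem

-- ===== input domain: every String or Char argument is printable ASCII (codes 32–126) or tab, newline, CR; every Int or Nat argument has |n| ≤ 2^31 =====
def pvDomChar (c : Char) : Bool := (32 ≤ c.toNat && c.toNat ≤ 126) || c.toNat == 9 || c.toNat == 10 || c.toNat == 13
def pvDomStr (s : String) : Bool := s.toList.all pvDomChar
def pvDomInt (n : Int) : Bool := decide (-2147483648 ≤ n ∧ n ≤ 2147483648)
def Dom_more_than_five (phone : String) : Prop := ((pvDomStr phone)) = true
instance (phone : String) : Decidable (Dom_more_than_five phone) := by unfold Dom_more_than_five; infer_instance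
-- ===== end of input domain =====

-- B replaces A's ten per-digit scans by one pass that builds a frequency table, then ten lookups.

-- ===== PORT A =====
-- inner loop: count = 0; for j in range(8): if phone[j] == str(i): count += 1
def mtfCount (phone : String) (i : Int) : Int :=
  (PySem.List.pyRange 0 8 1).foldl (fun cnt j =>
    match PySem.Str.pyGet? phone j with
    | some c => if String.ofList [c] == PySem.Int.toStr i then cnt + 1 else cnt
    | none => cnt) 0

-- outer loop with early return: for i in range(10): … if count >= 5: return True
def mtfLoop (phone : String) : List Int → Bool
  | [] => false
  | i :: rest => if 5 ≤ mtfCount phone i then true else mtfLoop phone rest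

def more_than_five (phone : String) : Bool :=
  mtfLoop phone (PySem.List.pyRange 0 10 1)

-- ===== PORT B =====
-- one pass: counts = {}; for j in range(8): c = phone[j]; counts[c] = counts.get(c, 0) + 1
-- then: any(counts.get(d, 0) >= 5 for d in "0123456789")
def more_than_five_alt (phone : String) : Bool :=
  let counts : PySem.Dict Char Int :=
    (PySem.List.pyRange 0 8 1).foldl (fun d j =>
      match PySem.Str.pyGet? phone j with
      | some c => d.insert c (d.getD c 0 + 1)
      | none => d) PySem.Dict.empty
  "0123456789".toList.any (fun dch => decide (5 ≤ counts.getD dch 0))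

-- ===== PRECONDITION & SPEC =====
-- A raises IndexError on phone[j] when the string has fewer than 8 characters.
def Pre_more_than_five (phone : String) : Prop := 8 ≤ phone.toList.length
instance (phone : String) : Decidable (Pre_more_than_five phone) := by
  unfold Pre_more_than_five; infer_instance

def pvWitness_more_than_five : String := "12345678"

def Spec_more_than_five (phone : String) (out : Bool) : Prop := out = more_than_five_alt phone
instance (phone : String) (out : Bool) : Decidable (Spec_more_than_five phone out) := by
  unfold Spec_more_than_five; infer_instance

-- ===== CLAIM (what is proved, stated in full; the proofs are below) =====
def Claim_equal_more_than_five : Prop :=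
  ∀ (phone : String), Dom_more_than_five phone → Pre_more_than_five phone →
    Spec_more_than_five phone (more_than_five phone)

-- ===== LEMMAS AND PROOFS =====

theorem ofList_singleton_beq (c d : Char) :
    (String.ofList [c] == String.ofList [d]) = (c == d) := by
  by_cases h : c = d
  · subst h; simp
  · have hne : String.ofList [c] ≠ String.ofList [d] := by
      intro heq; exact h (by simpa using congrArg String.toList heq)
    simp [h, hne]

theorem mtfCount_foldl (phone : String) (c0 c1 c2 c3 c4 c5 c6 c7 : Char) (r : List Char)
    (hl : phone.toList = c0::c1::c2::c3::c4::c5::c6::c7::r) (i : Int) :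
    mtfCount phone i =
      [c0,c1,c2,c3,c4,c5,c6,c7].foldl
        (fun cnt c => if String.ofList [c] == PySem.Int.toStr i then cnt + 1 else cnt) 0 := by
  have hr : PySem.List.pyRange 0 8 1 = [0,1,2,3,4,5,6,7] := by decide
  simp only [mtfCount, hr, List.foldl, pysem, hl]
  rfl

theorem mtfCount_eq_count (phone : String) (c0 c1 c2 c3 c4 c5 c6 c7 : Char) (r : List Char)
    (hl : phone.toList = c0::c1::c2::c3::c4::c5::c6::c7::r) (i : Int) (d : Char)
    (hd : PySem.Int.toStr i = String.ofList [d]) :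
    mtfCount phone i = (([c0,c1,c2,c3,c4,c5,c6,c7].count d : Nat) : Int) := by
  rw [mtfCount_foldl phone c0 c1 c2 c3 c4 c5 c6 c7 r hl i]
  simp only [hd, ofList_singleton_beq]
  rw [PySem.List.foldl_count_if (fun c => c == d) [c0,c1,c2,c3,c4,c5,c6,c7] 0]
  simp [List.count]

theorem altCounts_eq_counter (phone : String) (c0 c1 c2 c3 c4 c5 c6 c7 : Char) (r : List Char)
    (hl : phone.toList = c0::c1::c2::c3::c4::c5::c6::c7::r) :
    (PySem.List.pyRange 0 8 1).foldl (fun d j =>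
      match PySem.Str.pyGet? phone j with
      | some c => d.insert c (d.getD c 0 + 1)
      | none => d) (PySem.Dict.empty : PySem.Dict Char Int)
    = PySem.Dict.counter [c0,c1,c2,c3,c4,c5,c6,c7] := by
  have hr : PySem.List.pyRange 0 8 1 = [0,1,2,3,4,5,6,7] := by decide
  have g0 : PySem.Str.pyGet? phone 0 = some c0 := by simp [pysem, hl]
  have g1 : PySem.Str.pyGet? phone 1 = some c1 := by simp [pysem, hl]
  have g2 : PySem.Str.pyGet? phone 2 = some c2 := by simp [pysem, hl]
  have g3 : PySem.Str.pyGet? phone 3 = some c3 := by simp [pysem, hl]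
  have g4 : PySem.Str.pyGet? phone 4 = some c4 := by simp [pysem, hl]
  have g5 : PySem.Str.pyGet? phone 5 = some c5 := by simp [pysem, hl]
  have g6 : PySem.Str.pyGet? phone 6 = some c6 := by simp [pysem, hl]
  have g7 : PySem.Str.pyGet? phone 7 = some c7 := by simp [pysem, hl]
  rw [← PySem.Dict.foldl_insert_getD_add_one_eq_counter]
  simp only [hr, List.foldl, g0, g1, g2, g3, g4, g5, g6, g7]

-- ===== VERDICT (by name: the statement is the Claim_ definition above) =====
theorem more_than_five_spec : Claim_equal_more_than_five := by
  intro phone _ hpre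
  unfold Spec_more_than_five
  unfold Pre_more_than_five at hpre
  rcases hl : phone.toList with _|⟨c0,_|⟨c1,_|⟨c2,_|⟨c3,_|⟨c4,_|⟨c5,_|⟨c6,_|⟨c7,r⟩⟩⟩⟩⟩⟩⟩⟩ <;>
      rw [hl] at hpre <;> simp at hpre
  -- main case: first 8 characters are c0..c7
  have e0 := mtfCount_eq_count phone c0 c1 c2 c3 c4 c5 c6 c7 r hl 0 '0' (by decide)
  have e1 := mtfCount_eq_count phone c0 c1 c2 c3 c4 c5 c6 c7 r hl 1 '1' (by decide)
  have e2 := mtfCount_eq_count phone c0 c1 c2 c3 c4 c5 c6 c7 r hl 2 '2' (by decide)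
  have e3 := mtfCount_eq_count phone c0 c1 c2 c3 c4 c5 c6 c7 r hl 3 '3' (by decide)
  have e4 := mtfCount_eq_count phone c0 c1 c2 c3 c4 c5 c6 c7 r hl 4 '4' (by decide)
  have e5 := mtfCount_eq_count phone c0 c1 c2 c3 c4 c5 c6 c7 r hl 5 '5' (by decide)
  have e6 := mtfCount_eq_count phone c0 c1 c2 c3 c4 c5 c6 c7 r hl 6 '6' (by decide)
  have e7 := mtfCount_eq_count phone c0 c1 c2 c3 c4 c5 c6 c7 r hl 7 '7' (by decide)
  have e8 := mtfCount_eq_count phone c0 c1 c2 c3 c4 c5 c6 c7 r hl 8 '8' (by decide)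
  have e9 := mtfCount_eq_count phone c0 c1 c2 c3 c4 c5 c6 c7 r hl 9 '9' (by decide)
  have hr10 : PySem.List.pyRange 0 10 1 = [0,1,2,3,4,5,6,7,8,9] := by decide
  have hcnt := altCounts_eq_counter phone c0 c1 c2 c3 c4 c5 c6 c7 r hl
  simp only [more_than_five, more_than_five_alt, hr10, mtfLoop, hcnt,
    e0, e1, e2, e3, e4, e5, e6, e7, e8, e9]
  simp [PySem.Dict.getD_counter, List.any_cons]
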